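-- pv_equiv track=rewrite | github.com/jajmo/advent-of-code-2021 | 12.py | lowerCounts
-- ===== SOURCE A (Python) =====
-- def lowerCounts(path):
--     counts = {}
--     lowers = 0
--
--     for i in path:
--         if i.isupper():
--             continue
--
--         if i in counts:
--             counts[i] += 1
--         else:
--             counts[i] = 1
--
--     for k in counts:
--         if counts[k] > 1:
--             lowers += 1
--
--     return lowers
-- ===== SOURCE B (Python) =====
-- def lowerCounts(path):
--     seen = set()
--     duplicates = set()
--
--     for i in path:
--         if i.isupper():
--             continue
--
--         if i in seen:
--             duplicates.add(i)
--         else: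
--             seen.add(i)
--
--     return len(duplicates)
-- ===== Notes on version B (the rewrite author's own statement) =====
-- stated objective: simpler
-- what changed: Replaced the occurrence-count dictionary plus a second thresholding loop over its keys with a single pass that maintains a 'seen' set and a 'duplicates' set, returning len(duplicates).
import Mathlib
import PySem

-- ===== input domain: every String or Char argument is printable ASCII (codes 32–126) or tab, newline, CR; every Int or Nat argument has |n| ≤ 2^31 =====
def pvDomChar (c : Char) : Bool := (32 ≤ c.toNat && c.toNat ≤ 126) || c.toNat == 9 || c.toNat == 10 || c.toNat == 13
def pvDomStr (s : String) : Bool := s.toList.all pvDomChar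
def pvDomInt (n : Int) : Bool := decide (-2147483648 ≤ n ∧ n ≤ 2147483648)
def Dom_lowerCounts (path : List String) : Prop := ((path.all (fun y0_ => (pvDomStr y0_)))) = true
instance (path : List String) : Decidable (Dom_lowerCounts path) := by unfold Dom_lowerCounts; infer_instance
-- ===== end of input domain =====

-- B replaces A's occurrence-count dictionary and its second thresholding loop by a single pass
-- maintaining a 'seen' set and a 'duplicates' set, returning the size of 'duplicates'; objective: simpler.

-- ===== PORT A =====
-- Python str.isupper(), exact on the ASCII domain: at least one cased (= alphabetic) character
-- and no lowercase character.  Shared by both ports, as both Pythons call i.isupper().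
def pyStrIsupper (s : String) : Bool :=
  s.toList.any PySem.Chars.isalpha && s.toList.all (fun c => !PySem.Chars.islower c)

def lowerCounts (path : List String) : Int :=
  let counts : PySem.Dict String Int :=
    path.foldl
      (fun counts i =>
        if pyStrIsupper i then counts
        else if counts.contains i then counts.modify i 0 (· + 1)
        else counts.insert i 1)
      PySem.Dict.empty
  counts.keys.foldl (fun lowers k => if counts.getD k 0 > 1 then lowers + 1 else lowers) 0

-- ===== PORT B =====
def lowerCounts_alt (path : List String) : Int :=
  let st : PySem.Set String × PySem.Set String :=
    path.foldl
      (fun st i =>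
        if pyStrIsupper i then st
        else if st.1.contains i then (st.1, st.2.add i)
        else (st.1.add i, st.2))
      (PySem.Set.empty, PySem.Set.empty)
  PySem.Set.len st.2

-- ===== PRECONDITION & SPEC =====
def Spec_lowerCounts (path : List String) (out : Int) : Prop := out = lowerCounts_alt path
instance (path : List String) (out : Int) : Decidable (Spec_lowerCounts path out) := by unfold Spec_lowerCounts; infer_instance

-- ===== CLAIM (what is proved, stated in full; the proofs are below) =====
def Claim_equal_lowerCounts : Prop := ∀ (path : List String), Dom_lowerCounts path → Spec_lowerCounts path (lowerCounts path)

-- ===== LEMMAS AND PROOFS =====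

-- a 'continue'-style loop is the same loop over the filtered list
theorem foldl_skip {α β : Type} (c : α → Bool) (g : β → α → β) :
    ∀ (l : List α) (init : β),
      l.foldl (fun s i => if c i then s else g s i) init
        = (l.filter (fun i => !c i)).foldl g init := by
  intro l
  induction l with
  | nil => intro init; rfl
  | cons a t ih =>
      intro init
      by_cases h : c a = true <;> simp [List.foldl, List.filter, h, ih]

-- a counting loop 'if P k: acc += 1' is acc + countP
theorem foldl_count {α : Type} (P : α → Prop) [DecidablePred P] :
    ∀ (l : List α) (acc : Int),
      l.foldl (fun a k => if P k then a + 1 else a) acc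
        = acc + (l.countP (fun k => decide (P k)) : Int) := by
  intro l
  induction l with
  | nil => intro acc; simp
  | cons a t ih =>
      intro acc
      by_cases h : P a <;> simp [List.foldl, h, ih] <;> ring

-- A's contains/modify/insert loop builds exactly collections.Counter
theorem countsFold_eq_counter :
    ∀ (l : List String) (d : PySem.Dict String Int),
      l.foldl
        (fun counts i =>
          if counts.contains i then counts.modify i 0 (· + 1)
          else counts.insert i 1) d
        = l.foldl (fun d x => d.modify x 0 (· + 1)) d := by
  intro l
  induction l with
  | nil => intro d; rfl
  | cons a t ih =>
      intro d
      by_cases h : d.contains a = true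
      · simp [List.foldl, h, ih]
      · simp only [List.foldl, h, if_neg, Bool.false_eq_true, not_false_iff, ih]
        congr 1
        have h2 : d.get? a = none := by
          rw [PySem.Dict.contains_eq_isSome_get?] at h
          simpa using h
        simp [PySem.Dict.modify, PySem.Dict.getD, h2]

-- B's loop: the duplicates set stays Nodup and holds exactly the already-duplicated elements
theorem bFold_spec :
    ∀ (l : List String) (seen dup : PySem.Set String),
      seen.Nodup → dup.Nodup → (∀ x ∈ dup, x ∈ seen) →
      ((l.foldl
          (fun (st : PySem.Set String × PySem.Set String) i =>
            if st.1.contains i then (st.1, st.2.add i)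
            else (st.1.add i, st.2)) (seen, dup)).2.Nodup
        ∧ ∀ x, x ∈ (l.foldl
          (fun (st : PySem.Set String × PySem.Set String) i =>
            if st.1.contains i then (st.1, st.2.add i)
            else (st.1.add i, st.2)) (seen, dup)).2
            ↔ (x ∈ dup ∨ (x ∈ seen ∧ x ∈ l) ∨ 2 ≤ l.count x)) := by
  intro l
  induction l with
  | nil =>
      intro seen dup hs hd hsub
      refine ⟨hd, fun x => ?_⟩
      simp
  | cons a t ih =>
      intro seen dup hs hd hsub
      simp only [List.foldl]
      by_cases h : seen.contains a = true
      · have ha : a ∈ seen := (PySem.Set.contains_iff seen a).mp h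
        rw [if_pos h]
        obtain ⟨n, m⟩ := ih seen (dup.add a) hs (PySem.Set.nodup_add dup a hd)
          (fun x hx => by
            rcases (PySem.Set.mem_add dup a x).mp hx with hx' | rfl
            · exact hsub x hx'
            · exact ha)
        refine ⟨n, fun x => ?_⟩
        rw [m x, PySem.Set.mem_add]
        by_cases hx : x = a
        · subst hx
          simp [ha]
        · have hc : (t.count x) = (a :: t).count x := by
            simp only [List.count_cons, beq_iff_eq]
            rw [if_neg (fun hh => hx hh.symm), Nat.add_zero]
          rw [← hc]
          constructor
          · rintro ((h1 | rfl) | h2 | h3)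
            · exact Or.inl h1
            · exact absurd rfl hx
            · exact Or.inr (Or.inl ⟨h2.1, List.mem_cons_of_mem a h2.2⟩)
            · exact Or.inr (Or.inr h3)
          · rintro (h1 | h2 | h3)
            · exact Or.inl (Or.inl h1)
            · rcases List.mem_cons.mp h2.2 with rfl | hm
              · exact Or.inl (Or.inr rfl)
              · exact Or.inr (Or.inl ⟨h2.1, hm⟩)
            · exact Or.inr (Or.inr h3)
      · have ha : a ∉ seen := fun hm => h ((PySem.Set.contains_iff seen a).mpr hm)
        rw [if_neg h]
        obtain ⟨n, m⟩ := ih (seen.add a) dup (PySem.Set.nodup_add seen a hs) hd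
          (fun x hx => (PySem.Set.mem_add seen a x).mpr (Or.inl (hsub x hx)))
        refine ⟨n, fun x => ?_⟩
        rw [m x]
        by_cases hx : x = a
        · subst hx
          have hnd : x ∉ dup := fun hm => ha (hsub x hm)
          have hmem : x ∈ PySem.Set.add seen x := (PySem.Set.mem_add seen x x).mpr (Or.inr rfl)
          have hcnt : (x :: t).count x = t.count x + 1 := by simp
          constructor
          · rintro (h1 | h2 | h3)
            · exact absurd h1 hnd
            · exact Or.inr (Or.inr (by
                have := List.count_pos_iff.mpr h2.2
                omega))
            · exact Or.inr (Or.inr (by omega))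
          · rintro (h1 | h2 | h3)
            · exact absurd h1 hnd
            · exact absurd h2.1 ha
            · rw [hcnt] at h3
              exact Or.inr (Or.inl ⟨hmem, List.count_pos_iff.mp (by omega)⟩)
        · have hc : (t.count x) = (a :: t).count x := by
            simp only [List.count_cons, beq_iff_eq]
            rw [if_neg (fun hh => hx hh.symm), Nat.add_zero]
          rw [← hc, PySem.Set.mem_add]
          constructor
          · rintro (h1 | h2 | h3)
            · exact Or.inl h1
            · rcases h2.1 with hm | rfl
              · exact Or.inr (Or.inl ⟨hm, List.mem_cons_of_mem a h2.2⟩)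
              · exact absurd rfl hx
            · exact Or.inr (Or.inr h3)
          · rintro (h1 | h2 | h3)
            · exact Or.inl h1
            · rcases List.mem_cons.mp h2.2 with rfl | hm
              · exact absurd rfl hx
              · exact Or.inr (Or.inl ⟨Or.inl h2.1, hm⟩)
            · exact Or.inr (Or.inr h3)

theorem lowerCounts_eq_alt : ∀ path : List String, lowerCounts path = lowerCounts_alt path := by
  intro path
  simp only [lowerCounts, lowerCounts_alt]
  rw [foldl_skip pyStrIsupper, foldl_skip pyStrIsupper]
  set l := path.filter (fun i => !pyStrIsupper i) with hl
  rw [countsFold_eq_counter, ← PySem.Dict.counter_eq_foldl]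
  rw [PySem.Dict.keys_counter]
  rw [foldl_count (fun k => (PySem.Dict.counter l).getD k 0 > 1)]
  have hq : (PySem.Set.ofList l).countP (fun k => decide ((PySem.Dict.counter l).getD k 0 > 1))
      = (PySem.Set.ofList l).countP (fun k => decide (2 ≤ l.count k)) := by
    apply List.countP_congr
    intro k _
    rw [PySem.Dict.getD_counter]
    simp only [decide_eq_true_eq, gt_iff_lt]
    omega
  rw [hq]
  obtain ⟨hnod, hmem⟩ := bFold_spec l PySem.Set.empty PySem.Set.empty
    List.nodup_nil List.nodup_nil (fun x hx => absurd hx (List.not_mem_nil))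
  set D := (l.foldl
      (fun (st : PySem.Set String × PySem.Set String) i =>
        if st.1.contains i then (st.1, st.2.add i)
        else (st.1.add i, st.2)) (PySem.Set.empty, PySem.Set.empty)).2 with hD
  have hmem' : ∀ x, x ∈ D ↔ 2 ≤ l.count x := by
    intro x
    rw [hmem x]
    simp
  have hperm : ((PySem.Set.ofList l).filter (fun k => decide (2 ≤ l.count k))).Perm D := by
    rw [List.perm_ext_iff_of_nodup ((PySem.Set.nodup_ofList l).filter _) hnod]
    intro x
    rw [List.mem_filter, hmem' x, PySem.Set.mem_ofList]
    simp only [decide_eq_true_eq]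
    constructor
    · exact fun h => h.2
    · intro h
      exact ⟨List.count_pos_iff.mp (by omega), h⟩
  rw [List.countP_eq_length_filter, hperm.length_eq]
  simp [PySem.Set.len]

-- ===== VERDICT (by name: the statement is the Claim_ definition above) =====
theorem lowerCounts_spec : Claim_equal_lowerCounts := by
  intro path _
  exact lowerCounts_eq_alt path
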